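-- pv_equiv track=rewrite | github.com/seonwook97/Coding_test | Programmers/70129.py | solution
-- ===== SOURCE A (Python) =====
-- def solution(x):
--     answer = []
--
--     trans_cnt = 0 # 이진 변환 횟수
--     zero_cnt = 0 # 0을 지운 총 횟수
--
--     while True:
--         if x == '1':
--             break
--         zero_cnt += x.count('0') # 지운 0의 개수 count
--         x = x.replace('0', '') # 0 제거
--
--         x = bin(len(x))[2:] # 0을 제거 한 후 문자열 길이 이진 변환
--
--         trans_cnt += 1 # 이진 변환 count
--
--     answer = [trans_cnt, zero_cnt]
--
--     return answer
-- ===== SOURCE B (Python) =====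
-- def solution(x):
--     # Integer-state reformulation: keep only the count of remaining '1'-bits
--     # and count removed zeros with bit arithmetic instead of string rebuilding.
--     if x == '1':
--         return [0, 0]
--     zero = x.count('0')
--     n = len(x) - zero          # length after the first zero-removal
--     trans = 1
--     while n != 1:
--         m = n
--         ones = 0
--         while m:
--             if m & 1:
--                 ones += 1
--             else:
--                 zero += 1
--             m >>= 1
--         n = ones
--         trans += 1
--     return [trans, zero]
-- ===== Notes on version B (the rewrite author's own statement) =====
-- stated objective: alternative
-- what changed: Replaces A's string simulation (count/replace/bin on a rebuilt binary string each round) by integer bit arithmetic: the state is the number of remaining ones, and each round scans its bits with shift-and-mask, never materialising a string.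
import Mathlib
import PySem

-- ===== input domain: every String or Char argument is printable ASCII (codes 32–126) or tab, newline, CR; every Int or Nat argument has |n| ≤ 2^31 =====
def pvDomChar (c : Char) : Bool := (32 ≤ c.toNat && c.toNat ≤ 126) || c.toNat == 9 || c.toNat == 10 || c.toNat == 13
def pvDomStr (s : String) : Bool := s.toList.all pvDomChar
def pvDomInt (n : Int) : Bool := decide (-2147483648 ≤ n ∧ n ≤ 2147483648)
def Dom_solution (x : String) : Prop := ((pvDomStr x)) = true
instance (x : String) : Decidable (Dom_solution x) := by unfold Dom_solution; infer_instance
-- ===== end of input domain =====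

-- B replaces A's per-round string rebuilding (count/replace/bin) by integer bit arithmetic on the
-- count of remaining ones; return values proved equal on Pre_ (inputs where A's loop terminates).

-- ===== PORT A =====
-- A's 'while True' loop. The fuel only bounds the recursion: on every input admitted by
-- Pre_solution the loop runs at most x.length+1 times, so the fuel chosen in 'solution' is never
-- exhausted there (on the inputs outside Pre_solution the Python loops forever).
def solutionLoop : Nat → String → Int → Int → List Int
  | 0, _, tr, zero => [tr, zero]
  | (fuel + 1), x, tr, zero =>
    if x = "1" then [tr, zero]                                -- if x == '1': break
    else
      solutionLoop fuel
        (PySem.Str.slice (PySem.Int.pyBin                     -- x = bin(len(x))[2:]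
          (PySem.Str.len (PySem.Str.replace x "0" ""))) (some 2) none)  -- x = x.replace('0','')
        (tr + 1)                                              -- trans_cnt += 1
        (zero + (PySem.Str.count x "0" : Int))                -- zero_cnt += x.count('0')

def solution (x : String) : List Int :=
  solutionLoop (x.toList.length + 2) x 0 0

-- ===== PORT B =====
-- inner 'while m:' loop of Source B: shift-and-mask bit scan, returns (ones, zero)
def bitLoop (m : Nat) (ones : Nat) (zero : Int) : Nat × Int :=
  if m = 0 then (ones, zero)
  else if m % 2 = 1 then bitLoop (m / 2) (ones + 1) zero
  else bitLoop (m / 2) ones (zero + 1)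
termination_by m
decreasing_by all_goals exact Nat.div_lt_self (Nat.pos_of_ne_zero (by assumption)) (by norm_num)

-- outer 'while n != 1:' loop of Source B (fuel: never exhausted on Pre_ inputs, see above)
def solutionAltLoop : Nat → Nat → Int → Int → List Int
  | 0, _, tr, zero => [tr, zero]
  | (fuel + 1), n, tr, zero =>
    if n = 1 then [tr, zero]
    else
      solutionAltLoop fuel (bitLoop n 0 zero).1 (tr + 1) (bitLoop n 0 zero).2

def solution_alt (x : String) : List Int :=
  if x = "1" then [0, 0]
  else
    -- n = len(x) - zero : count ≤ length, so Nat subtraction is exact here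
    solutionAltLoop (x.toList.length + 1)
      (x.toList.length - PySem.Str.count x "0") 1 (PySem.Str.count x "0" : Int)

-- ===== PRECONDITION & SPEC =====
-- Pre_ excludes exactly the inputs on which the Python A never returns (its loop runs forever):
-- strings, including the empty string, consisting only of '0' characters.
def Pre_solution (x : String) : Prop := x.toList.any (fun c => !(c == '0')) = true
instance (x : String) : Decidable (Pre_solution x) := by unfold Pre_solution; infer_instance
def pvWitness_solution : String := "1"

def Spec_solution (x : String) (out : List Int) : Prop := out = solution_alt x
instance (x : String) (out : List Int) : Decidable (Spec_solution x out) := by unfold Spec_solution; infer_instance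

-- ===== CLAIM (what is proved, stated in full; the proofs are below) =====
def Claim_equal_solution : Prop := ∀ (x : String), Dom_solution x → Pre_solution x → Spec_solution x (solution x)

-- ===== LEMMAS AND PROOFS =====

theorem digitChar_zero : Nat.digitChar 0 = '0' := rfl
theorem digitChar_one : Nat.digitChar 1 = '1' := rfl
theorem cnt11 : List.count '1' (['1'] : List Char) = 1 := by decide
theorem cnt01 : List.count '0' (['1'] : List Char) = 0 := by decide
theorem cnt10 : List.count '1' (['0'] : List Char) = 0 := by decide
theorem cnt00 : List.count '0' (['0'] : List Char) = 1 := by decide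

-- binary digits of n, most significant first: the char list that bin(n)[2:] denotes (n : Nat)
def binRep (n : Nat) : List Char :=
  if n < 2 then [Nat.digitChar n] else binRep (n / 2) ++ [Nat.digitChar (n % 2)]
termination_by n
decreasing_by exact Nat.div_lt_self (by omega) (by norm_num)

theorem binRep_lt_two (n : Nat) (h : n < 2) : binRep n = [Nat.digitChar n] := by
  rw [binRep, if_pos h]

theorem binRep_zero : binRep 0 = ['0'] := by rw [binRep_lt_two 0 (by norm_num), digitChar_zero]

theorem binRep_one : binRep 1 = ['1'] := by rw [binRep_lt_two 1 (by norm_num), digitChar_one]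

theorem binRep_eq_append (n : Nat) (h : 2 ≤ n) :
    binRep n = binRep (n / 2) ++ [Nat.digitChar (n % 2)] := by
  rw [binRep, if_neg (by omega)]

theorem toDigitsCore_eq_binRep (f : Nat) : ∀ (n : Nat) (l : List Char), n / 2 < f →
    Nat.toDigitsCore 2 f n l = binRep n ++ l := by
  induction f with
  | zero => intro n l h; omega
  | succ f ih =>
    intro n l h
    rw [Nat.toDigitsCore]
    by_cases h2 : n / 2 = 0
    · rw [if_pos h2, binRep_lt_two n (by omega), Nat.mod_eq_of_lt (by omega)]
      rfl
    · have hrec : n / 2 / 2 < f := by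
        have := Nat.div_lt_self (show 0 < n / 2 by omega) (show 1 < 2 by norm_num)
        omega
      rw [if_neg h2, ih (n / 2) _ hrec, binRep_eq_append n (by omega)]
      simp

theorem toDigits_eq_binRep (n : Nat) : Nat.toDigits 2 n = binRep n := by
  have := toDigitsCore_eq_binRep (n + 1) n [] (by omega)
  simpa [Nat.toDigits] using this

theorem binRep_ne_nil (n : Nat) : binRep n ≠ [] := by
  rw [binRep]; split <;> simp

theorem binRep_mem (n : Nat) : ∀ c ∈ binRep n, c = '0' ∨ c = '1' := by
  induction n using Nat.strong_induction_on with
  | _ n ih =>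
    intro c hc
    by_cases h : n < 2
    · interval_cases n
      · rw [binRep_zero] at hc; simp at hc; left; exact hc
      · rw [binRep_one] at hc; simp at hc; right; exact hc
    · rw [binRep_eq_append n (by omega)] at hc
      rcases List.mem_append.1 hc with h1 | h1
      · exact ih (n / 2) (by omega) c h1
      · simp at h1
        have h2 : n % 2 = 0 ∨ n % 2 = 1 := by omega
        rcases h2 with h2 | h2
        · left; rw [h1, h2, digitChar_zero]
        · right; rw [h1, h2, digitChar_one]

theorem binRep_eq_one_iff (n : Nat) : binRep n = ['1'] ↔ n = 1 := by
  constructor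
  · intro h
    by_cases hn : n < 2
    · interval_cases n
      · rw [binRep_zero] at h
        exact absurd h (by decide)
      · rfl
    · rw [binRep_eq_append n (by omega)] at h
      rcases List.exists_cons_of_ne_nil (binRep_ne_nil (n / 2)) with ⟨a, t, ht⟩
      rw [ht] at h
      have hl := congrArg List.length h
      simp [List.length_append] at hl
  · intro h; rw [h, binRep_one]

theorem binRep_count1_pos (n : Nat) (hn : 1 ≤ n) : 1 ≤ (binRep n).count '1' := by
  induction n using Nat.strong_induction_on with
  | _ n ih =>
    by_cases h : n < 2
    · have h1 : n = 1 := by omega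
      rw [h1, binRep_one, cnt11]
    · rw [binRep_eq_append n (by omega), List.count_append]
      have := ih (n / 2) (by omega) (by omega)
      omega

theorem filter_length_eq_count1 (cs : List Char) (h : ∀ c ∈ cs, c = '0' ∨ c = '1') :
    (cs.filter (fun c => !(c == '0'))).length = cs.count '1' := by
  induction cs with
  | nil => simp
  | cons a t ih =>
    have ha := h a (by simp)
    have ht := fun c hc => h c (List.mem_cons_of_mem a hc)
    rcases ha with ha | ha <;> subst ha <;> simp [ih ht]

theorem count_add_filter_length (cs : List Char) :
    cs.count '0' + (cs.filter (fun c => !(c == '0'))).length = cs.length := by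
  induction cs with
  | nil => simp
  | cons a t ih =>
    by_cases ha : a = '0' <;>
      simp [ha, ← ih] <;> omega

-- PySem.Chars.count with the single-character pattern "0" is List.count '0'
theorem countGo_eq (l : List Char) : ∀ (fuel : Nat) (acc : Nat), l.length ≤ fuel →
    PySem.Chars.count.go ['0'] fuel l acc = acc + l.count '0' := by
  induction l with
  | nil => intro fuel acc h; cases fuel <;> simp [PySem.Chars.count.go]
  | cons a t ih =>
    intro fuel acc h
    cases fuel with
    | zero => simp at h
    | succ f =>
      rw [PySem.Chars.count.go]
      by_cases ha : a = '0'
      · subst ha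
        rw [if_pos (by simp [List.isPrefixOf])]
        have hd : List.drop (['0'] : List Char).length ('0' :: t) = t := by simp
        rw [hd, ih f (acc + 1) (by simpa using h)]
        simp
        omega
      · have hpre : List.isPrefixOf ['0'] (a :: t) = false := by
          simp [List.isPrefixOf]
          intro hh; exact ha hh.symm
        rw [if_neg (by simp [hpre]), ih f acc (by simpa using h)]
        simp [ha]

theorem chars_count0 (cs : List Char) : PySem.Chars.count cs ['0'] = cs.count '0' := by
  rw [PySem.Chars.count]
  simp only [List.isEmpty_cons, if_false, Bool.false_eq_true]
  rw [countGo_eq cs cs.length 0 (le_refl _)]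
  omega

theorem str_count0 (s : String) : PySem.Str.count s "0" = s.toList.count '0' := by
  rw [PySem.Str.count_eq]
  have h0 : ("0" : String).toList = ['0'] := rfl
  rw [h0, chars_count0]

-- PySem.Chars.replace with pattern "0" and empty replacement is a filter
theorem replaceGo_eq (l : List Char) : ∀ (fuel : Nat) (acc : List Char), l.length ≤ fuel →
    PySem.Chars.replace.go ['0'] [] fuel l acc
      = acc.reverse ++ l.filter (fun c => !(c == '0')) := by
  induction l with
  | nil => intro fuel acc h; cases fuel <;> simp [PySem.Chars.replace.go]
  | cons a t ih =>
    intro fuel acc h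
    cases fuel with
    | zero => simp at h
    | succ f =>
      rw [PySem.Chars.replace.go]
      by_cases ha : a = '0'
      · subst ha
        rw [if_pos (by simp [List.isPrefixOf])]
        have hd : List.drop (['0'] : List Char).length ('0' :: t) = t := by simp
        rw [hd, ih f _ (by simpa using h)]
        simp
      · have hpre : List.isPrefixOf ['0'] (a :: t) = false := by
          simp [List.isPrefixOf]
          intro hh; exact ha hh.symm
        rw [if_neg (by simp [hpre]), ih f (a :: acc) (by simpa using h)]
        simp [ha]

theorem chars_replace0 (cs : List Char) :
    PySem.Chars.replace cs ['0'] [] = cs.filter (fun c => !(c == '0')) := by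
  rw [PySem.Chars.replace]
  simp only [List.isEmpty_cons, if_false, Bool.false_eq_true]
  rw [replaceGo_eq cs cs.length [] (le_refl _)]
  simp

theorem str_replace0 (s : String) :
    (PySem.Str.replace s "0" "").toList = s.toList.filter (fun c => !(c == '0')) := by
  rw [PySem.Str.toList_replace]
  have h0 : ("0" : String).toList = ['0'] := rfl
  have he : ("" : String).toList = [] := rfl
  rw [h0, he, chars_replace0]

-- bin(k)[2:] as a string, k : Nat
theorem slice_pyBin (k : Nat) :
    PySem.Str.slice (PySem.Int.pyBin (k : Int)) (some 2) none = String.ofList (binRep k) := by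
  apply String.ext
  rw [PySem.Str.toList_slice, PySem.Int.toList_pyBin, String.toList_ofList]
  have h0b : PySem.Int.toBinChars0b (k : Int) = '0' :: 'b' :: Nat.toDigits 2 k := by
    rw [PySem.Int.toBinChars0b]; simp
  rw [h0b, toDigits_eq_binRep]
  have hcl : PySem.Chars.slice ('0' :: 'b' :: binRep k) (some 2) none
      = PySem.List.slice ('0' :: 'b' :: binRep k) (some 2) none := rfl
  rw [hcl, PySem.List.slice_from _ (by norm_num : (0 : Int) ≤ 2)]
  rfl

theorem bitLoop_pos (m : Nat) (ones : Nat) (zero : Int) (h : m ≠ 0) :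
    bitLoop m ones zero = if m % 2 = 1 then bitLoop (m / 2) (ones + 1) zero
      else bitLoop (m / 2) ones (zero + 1) := by
  rw [bitLoop, if_neg h]

theorem bitLoop_one (ones : Nat) (zero : Int) : bitLoop 1 ones zero = (ones + 1, zero) := by
  rw [bitLoop_pos 1 ones zero (by norm_num), if_pos (by norm_num)]
  rw [bitLoop]
  norm_num

-- the inner bit loop of B counts the '1'- and '0'-digits of n's binary representation
theorem bitLoop_eq (n : Nat) (hn : 1 ≤ n) : ∀ (ones : Nat) (zero : Int),
    bitLoop n ones zero = (ones + (binRep n).count '1', zero + ((binRep n).count '0' : Int)) := by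
  induction n using Nat.strong_induction_on with
  | _ n ih =>
    intro ones zero
    by_cases h2 : n < 2
    · have h1 : n = 1 := by omega
      subst h1
      rw [bitLoop_one, binRep_one, cnt11, cnt01]
      norm_num
    · rw [bitLoop_pos n ones zero (by omega), binRep_eq_append n (by omega)]
      have ihh := ih (n / 2) (by omega) (by omega)
      by_cases hm : n % 2 = 1
      · rw [if_pos hm, ihh, hm, digitChar_one, Prod.mk.injEq]
        constructor
        · rw [List.count_append, cnt11]; omega
        · rw [List.count_append, cnt01]; push_cast; ring
      · have hm0 : n % 2 = 0 := by omega
        rw [if_neg hm, ihh, hm0, digitChar_zero, Prod.mk.injEq]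
        constructor
        · rw [List.count_append, cnt10]; omega
        · rw [List.count_append, cnt00]; push_cast; ring

theorem ofList_eq_one_iff (cs : List Char) : (String.ofList cs = "1") ↔ cs = ['1'] := by
  constructor
  · intro h
    have h2 := congrArg String.toList h
    rw [String.toList_ofList] at h2
    exact h2
  · intro h; rw [h]

-- lockstep: A's string round started on bin(n)[2:] equals B's integer round started on n
theorem lockstep (f : Nat) : ∀ (n : Nat), 1 ≤ n → ∀ (t z : Int),
    solutionLoop f (String.ofList (binRep n)) t z = solutionAltLoop f n t z := by
  induction f with
  | zero => intro n hn t z; rfl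
  | succ f ih =>
    intro n hn t z
    rw [solutionLoop, solutionAltLoop]
    by_cases h1 : n = 1
    · subst h1
      have e1 : String.ofList (binRep 1) = "1" := (ofList_eq_one_iff _).2 binRep_one
      rw [e1]
      simp
    · rw [if_neg (fun hh => h1 ((binRep_eq_one_iff n).1 ((ofList_eq_one_iff _).1 hh))),
        if_neg h1]
      have hcount : PySem.Str.count (String.ofList (binRep n)) "0" = (binRep n).count '0' := by
        rw [str_count0, String.toList_ofList]
      have hlen : PySem.Str.len (PySem.Str.replace (String.ofList (binRep n)) "0" "")
          = (((binRep n).count '1' : Nat) : Int) := by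
        rw [PySem.Str.len_eq, str_replace0, String.toList_ofList,
          filter_length_eq_count1 _ (binRep_mem n)]
      rw [hcount, hlen, slice_pyBin ((binRep n).count '1'), bitLoop_eq n hn]
      dsimp only
      rw [Nat.zero_add]
      exact ih ((binRep n).count '1') (binRep_count1_pos n hn) (t + 1)
        (z + ((binRep n).count '0' : Int))

-- ===== VERDICT (by name: the statement is the Claim_ definition above) =====
theorem solution_spec : Claim_equal_solution := by
  intro x _ hpre
  unfold Spec_solution solution solution_alt
  by_cases h1 : x = "1"
  · subst h1
    rw [if_pos rfl]
    have hf : ("1" : String).toList.length + 2 = 3 := rfl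
    rw [hf, show (3 : Nat) = 2 + 1 from rfl, solutionLoop, if_pos rfl]
  · rw [if_neg h1]
    have hfuel : x.toList.length + 2 = (x.toList.length + 1) + 1 := rfl
    rw [hfuel, solutionLoop, if_neg h1]
    have hcount : PySem.Str.count x "0" = x.toList.count '0' := str_count0 x
    have hlen : PySem.Str.len (PySem.Str.replace x "0" "")
        = (((x.toList.filter (fun c => !(c == '0'))).length : Nat) : Int) := by
      rw [PySem.Str.len_eq, str_replace0]
    have hn1 : 1 ≤ (x.toList.filter (fun c => !(c == '0'))).length := by
      obtain ⟨c, hc, hc0⟩ := List.any_eq_true.1 hpre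
      exact List.length_pos_of_mem (List.mem_filter.2 ⟨hc, hc0⟩)
    rw [hlen, slice_pyBin, lockstep _ _ hn1]
    have hsub : (x.toList.filter (fun c => !(c == '0'))).length
        = x.toList.length - x.toList.count '0' := by
      have := count_add_filter_length x.toList
      omega
    rw [hsub, hcount]
    norm_num
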